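-- pv_equiv track=rewrite | github.com/cryphon/Advent-Of-Code-2024 | days/day9.py | two_pointer_swap
-- ===== SOURCE A (Python) =====
-- from collections import deque, defaultdict
--
-- def two_pointer_swap(arr):
--     """
--     Move files towards the rightmost free blocks, swapping with dots.
--     """
--
--     # Initialize variables
--     p1, p2 = 0, len(arr) - 1
--
--     # Queue to store positions of dots
--     dot_positions = deque(i for i, val in enumerate(arr) if val == '.')
--
--     # Pointer for numbers from the end
--     p2 = len(arr) - 1
--
--     # Process dots with numbers
--     while dot_positions and p2 >= p1:
--         # Get the next dot position
--         p1 = dot_positions.popleft()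
--         # Skip non-numeric values at p2
--         while p2 >= 0 and (arr[p2] == '.' or p2 in dot_positions):
--             p2 -= 1
--         # If a valid number is found, swap it with the dot
--         if p2 > p1:  # Ensure valid swapping range
--             arr[p1], arr[p2] = arr[p2], '.'
--             p2 -= 1
--
--     return arr
-- ===== SOURCE B (Python) =====
-- def two_pointer_swap(arr):
--     """
--     Move files towards the rightmost free blocks, swapping with dots.
--     Pair the dot positions (left to right) with the non-dot positions
--     (right to left) and swap each pair until they cross.
--     Mutates arr in place, like the original.
--     """
--     dots = [i for i, x in enumerate(arr) if x == '.']
--     vals = [i for i, x in enumerate(arr) if x != '.']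
--     for d, v in zip(dots, reversed(vals)):
--         if d > v:
--             break
--         arr[d], arr[v] = arr[v], '.'
--     return arr
-- ===== Notes on version B (the rewrite author's own statement) =====
-- stated objective: alternative
-- what changed: Replaces the deque-driven scan (pop leftmost dot, then walk a pointer down past dots with a deque membership test) by precomputing the dot positions and the non-dot positions once and zipping them, leftmost dot with rightmost value, swapping until the pair crosses.
import Mathlib
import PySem

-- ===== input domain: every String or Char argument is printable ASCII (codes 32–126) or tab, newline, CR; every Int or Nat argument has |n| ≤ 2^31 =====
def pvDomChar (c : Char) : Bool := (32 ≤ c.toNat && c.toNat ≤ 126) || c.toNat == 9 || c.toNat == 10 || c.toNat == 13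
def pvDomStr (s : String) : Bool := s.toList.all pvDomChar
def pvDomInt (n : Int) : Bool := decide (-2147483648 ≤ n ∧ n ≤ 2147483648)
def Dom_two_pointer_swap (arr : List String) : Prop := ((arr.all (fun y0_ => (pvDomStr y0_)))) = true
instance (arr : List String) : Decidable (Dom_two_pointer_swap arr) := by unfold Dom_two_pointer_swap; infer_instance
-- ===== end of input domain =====

-- B replaces A's deque of dot positions (popped and membership-tested inside the scan)
-- by a one-shot zip of the dot positions with the reversed non-dot positions, swapped until they cross.
-- Both the Python A and the Python B mutate `arr` in place identically; the ports model the returned list.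


-- ===== PORT A =====
-- arr[i] for an index both ports only use in range (0 ≤ i < len arr)
def pvG (a : List String) (i : Int) : String := PySem.List.pyGetD a i "."

-- the indices 0..len-1, as Ints (the `i` of `enumerate(arr)`)
def pvIdxs (a : List String) : List Int := List.map (fun k : Nat => (k : Int)) (List.range a.length)

-- `[i for i, val in enumerate(arr) if val == '.']` (A's deque, B's `dots` list)
def pvDots (a : List String) : List Int := (pvIdxs a).filter (fun i => pvG a i == ".")

-- `arr[d], arr[v] = arr[v], '.'` (the identical in-place swap both Pythons perform; d ≠ v on every execution)
def pvSwap (a : List String) (d v : Int) : List String := (a.set d.toNat (pvG a v)).set v.toNat "."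

-- inner `while p2 >= 0 and (arr[p2] == '.' or p2 in dot_positions): p2 -= 1`
def skipA (a : List String) (dots : List Int) (p2 : Int) : Int :=
  if h : 0 ≤ p2 ∧ (pvG a p2 = "." ∨ p2 ∈ dots) then skipA a dots (p2 - 1) else p2
termination_by (p2 + 1).toNat
decreasing_by omega

-- outer `while dot_positions and p2 >= p1`
def loopA (a : List String) (dots : List Int) (p1 p2 : Int) : List String :=
  match dots with
  | [] => a
  | d :: rest =>
      if p1 ≤ p2 then
        let q := skipA a rest p2
        if d < q then loopA (pvSwap a d q) rest d (q - 1)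
        else loopA a rest d q
      else a

def two_pointer_swap (arr : List String) : List String :=
  loopA arr (pvDots arr) 0 ((arr.length : Int) - 1)

-- ===== PORT B =====
-- `[i for i, x in enumerate(arr) if x != '.']`
def pvVals (a : List String) : List Int := (pvIdxs a).filter (fun i => pvG a i != ".")

-- `for d, v in zip(dots, reversed(vals)): if d > v: break; swap`
def loopB (a : List String) : List (Int × Int) → List String
  | [] => a
  | (d, v) :: ps => if d > v then a else loopB (pvSwap a d v) ps

def two_pointer_swap_alt (arr : List String) : List String :=
  loopB arr ((pvDots arr).zip (pvVals arr).reverse)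

-- ===== PRECONDITION & SPEC =====
def Spec_two_pointer_swap (arr : List String) (out : List String) : Prop := out = two_pointer_swap_alt arr
instance (arr : List String) (out : List String) : Decidable (Spec_two_pointer_swap arr out) := by unfold Spec_two_pointer_swap; infer_instance

-- ===== CLAIM (what is proved, stated in full; the proofs are below) =====
def Claim_equal_two_pointer_swap : Prop := ∀ (arr : List String), Dom_two_pointer_swap arr → Spec_two_pointer_swap arr (two_pointer_swap arr)

-- ===== LEMMAS AND PROOFS =====

lemma skipA_le (a : List String) (dots : List Int) (p2 : Int) : skipA a dots p2 ≤ p2 := by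
  induction p2 using skipA.induct a dots with
  | case1 p2 h ih => rw [skipA, dif_pos h]; omega
  | case2 p2 h => rw [skipA, dif_neg h]

lemma skipA_stop (a : List String) (dots : List Int) (p2 : Int) :
    ¬ (0 ≤ skipA a dots p2 ∧ (pvG a (skipA a dots p2) = "." ∨ skipA a dots p2 ∈ dots)) := by
  induction p2 using skipA.induct a dots with
  | case1 p2 h ih => rw [skipA, dif_pos h]; exact ih
  | case2 p2 h => rw [skipA, dif_neg h]; exact h

lemma skipA_between (a : List String) (dots : List Int) (p2 : Int) :
    ∀ j : Int, skipA a dots p2 < j → j ≤ p2 → (pvG a j = "." ∨ j ∈ dots) := by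
  induction p2 using skipA.induct a dots with
  | case1 p2 h ih =>
      intro j h1 h2
      rw [skipA, dif_pos h] at h1
      rcases lt_or_eq_of_le h2 with h2' | h2'
      · exact ih j h1 (by omega)
      · subst h2'; exact h.2
  | case2 p2 h =>
      intro j h1 h2
      rw [skipA, dif_neg h] at h1
      exact absurd h2 (by omega)

lemma mem_pvIdxs {a : List String} {i : Int} : i ∈ pvIdxs a ↔ 0 ≤ i ∧ i < (a.length : Int) := by
  unfold pvIdxs
  rw [List.mem_map]
  constructor
  · rintro ⟨j, hj, rfl⟩
    rw [List.mem_range] at hj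
    omega
  · intro h
    exact ⟨i.toNat, List.mem_range.mpr (by omega), by omega⟩

lemma mem_pvDots {a : List String} {i : Int} :
    i ∈ pvDots a ↔ (0 ≤ i ∧ i < (a.length : Int)) ∧ pvG a i = "." := by
  simp [pvDots, List.mem_filter, mem_pvIdxs]

lemma mem_pvVals {a : List String} {i : Int} :
    i ∈ pvVals a ↔ (0 ≤ i ∧ i < (a.length : Int)) ∧ pvG a i ≠ "." := by
  simp [pvVals, List.mem_filter, mem_pvIdxs]

lemma pairwise_pvIdxs (a : List String) : (pvIdxs a).Pairwise (· < ·) := by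
  unfold pvIdxs
  refine List.Pairwise.map _ (fun x y h => ?_) List.pairwise_lt_range
  exact_mod_cast h

lemma pairwise_pvDots (a : List String) : (pvDots a).Pairwise (· < ·) :=
  List.Pairwise.filter _ (pairwise_pvIdxs a)

lemma pairwise_pvVals (a : List String) : (pvVals a).Pairwise (· < ·) :=
  List.Pairwise.filter _ (pairwise_pvIdxs a)

lemma length_pvSwap (a : List String) (d v : Int) : (pvSwap a d v).length = a.length := by
  simp [pvSwap]

lemma pvG_set_ne {a : List String} {i j : Int} (x : String)
    (hi : 0 ≤ i) (hj : 0 ≤ j) (hne : i ≠ j) : pvG (a.set i.toNat x) j = pvG a j := by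
  simp only [pvG, PySem.List.pyGetD,
    PySem.List.pyGet?_of_nonneg _ hj]
  rw [List.getElem?_set_ne (by omega : i.toNat ≠ j.toNat)]

lemma pvG_swap_other (a : List String) {d v j : Int} (hd : 0 ≤ d) (hv : 0 ≤ v)
    (hjd : j ≠ d) (hjv : j ≠ v) (hj : 0 ≤ j) : pvG (pvSwap a d v) j = pvG a j := by
  rw [pvSwap, pvG_set_ne "." hv hj (fun h => hjv h.symm), pvG_set_ne _ hd hj (fun h => hjd h.symm)]

-- the core correspondence between A's deque scan and B's zip
lemma loop_eq : ∀ (ds : List Int) (a : List String) (vs : List Int) (p1 p2 : Int),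
    p1 ≤ p2 → p2 < (a.length : Int) →
    ds.Pairwise (· < ·) →
    (∀ d ∈ ds, 0 ≤ d ∧ d < (a.length : Int) ∧ pvG a d = ".") →
    vs.Pairwise (· > ·) →
    (∀ v ∈ vs, 0 ≤ v ∧ v ≤ p2 ∧ pvG a v ≠ ".") →
    (∀ j : Int, 0 ≤ j → j ≤ p2 → pvG a j ≠ "." → j ∈ vs ∨ (∀ d ∈ ds, j < d)) →
    loopA a ds p1 p2 = loopB a (ds.zip vs) := by
  intro ds
  induction ds with
  | nil => intro a vs p1 p2 _ _ _ _ _ _ _; simp [loopA, loopB]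
  | cons d rest ih =>
    intro a vs p1 p2 h12 hlen hdp hds hvp hvs h3
    obtain ⟨hd0, hdl, hdg⟩ := hds d (List.mem_cons_self ..)
    have hstop := skipA_stop a rest p2
    have hle := skipA_le a rest p2
    set s := skipA a rest p2 with hs
    -- any stop position that is ≥ 0 is a non-dot outside rest
    have hsprop : 0 ≤ s → pvG a s ≠ "." ∧ s ∉ rest := by
      intro h0
      constructor
      · intro hc; exact hstop ⟨h0, Or.inl hc⟩
      · intro hc; exact hstop ⟨h0, Or.inr hc⟩
    match vs with
    | [] =>
      -- no values left at or below p2: A finds nothing to swap and exits; B's zip is empty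
      have hsd : s < d := by
        by_cases h0 : 0 ≤ s
        · rcases h3 s h0 (by omega) (hsprop h0).1 with h | h
          · simp at h
          · exact h d (List.mem_cons_self ..)
        · omega
      simp only [loopA, if_pos h12, ← hs, if_neg (by omega : ¬ d < s), List.zip_nil_right, loopB]
      match rest with
      | [] => simp [loopA]
      | d2 :: r2 => simp [loopA, show ¬ d ≤ s by omega]
    | v :: vs' =>
      obtain ⟨hv0, hvp2, hvg⟩ := hvs v (List.mem_cons_self ..)
      have hvs'lt : ∀ v' ∈ vs', v' < v := by
        intro v' hv'; exact (List.pairwise_cons.mp hvp).1 v' hv'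
      by_cases hdv : d > v
      · -- B breaks; A's scan stops strictly left of d, no swap, loop exits
        have hsd : s < d := by
          by_cases h0 : 0 ≤ s
          · rcases h3 s h0 (by omega) (hsprop h0).1 with h | h
            · rcases List.mem_cons.mp h with rfl | h
              · omega
              · have := hvs'lt s h; omega
            · exact h d (List.mem_cons_self ..)
          · omega
        simp only [loopA, if_pos h12, ← hs, if_neg (by omega : ¬ d < s), List.zip_cons_cons,
          loopB, if_pos hdv]
        match rest with
        | [] => simp [loopA]
        | d2 :: r2 => simp [loopA, show ¬ d ≤ s by omega]
      · -- d < v (d = v is impossible: arr[d] = '.' ≠ arr[v]); A's scan stops exactly at v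
        have hdvne : d ≠ v := by intro h; rw [h] at hdg; exact hvg hdg
        have hdv' : d < v := by omega
        have hsv : s = v := by
          have h1 : v ≤ s := by
            by_contra hc
            push Not at hc
            rcases skipA_between a rest p2 v hc hvp2 with h | h
            · exact hvg h
            · exact hvg (hds v (List.mem_cons.mpr (Or.inr h))).2.2
          have h2 : s ≤ v := by
            have h0 : 0 ≤ s := by omega
            rcases h3 s h0 (by omega) (hsprop h0).1 with h | h
            · rcases List.mem_cons.mp h with rfl | h
              · omega
              · have := hvs'lt s h; omega
            · have := h d (List.mem_cons_self ..); omega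
          omega
        have hvl : v < (a.length : Int) := by omega
        simp only [loopA, if_pos h12, ← hs, hsv, if_pos hdv', List.zip_cons_cons, loopB,
          if_neg hdv]
        apply ih (pvSwap a d v) vs' d (v - 1) (by omega)
          (by rw [length_pvSwap]; omega)
          ((List.pairwise_cons.mp hdp).2)
        · intro d' hd'
          obtain ⟨h0, hl, hg⟩ := hds d' (List.mem_cons.mpr (Or.inr hd'))
          have hd'd : d < d' := (List.pairwise_cons.mp hdp).1 d' hd'
          have hd'v : d' ≠ v := by intro h; rw [h] at hg; exact hvg hg
          refine ⟨h0, by rw [length_pvSwap]; omega, ?_⟩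
          rw [pvG_swap_other a hd0 hv0 (by omega) hd'v h0]; exact hg
        · exact (List.pairwise_cons.mp hvp).2
        · intro v' hv'
          obtain ⟨h0, hl, hg⟩ := hvs v' (List.mem_cons.mpr (Or.inr hv'))
          have hv'v : v' < v := hvs'lt v' hv'
          have hv'd : v' ≠ d := by intro h; rw [h] at hg; exact hg hdg
          refine ⟨h0, by omega, ?_⟩
          rw [pvG_swap_other a hd0 hv0 hv'd (by omega) h0]; exact hg
        · intro j hj0 hjv hjg
          by_cases hjd : j = d
          · right; intro d' hd'; have := (List.pairwise_cons.mp hdp).1 d' hd'; omega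
          · have hjv' : j ≠ v := by omega
            rw [pvG_swap_other a hd0 hv0 hjd hjv' hj0] at hjg
            rcases h3 j hj0 (by omega) hjg with h | h
            · rcases List.mem_cons.mp h with rfl | h
              · omega
              · exact Or.inl h
            · exact Or.inr fun d' hd' => h d' (List.mem_cons.mpr (Or.inr hd'))

-- ===== VERDICT (by name: the statement is the Claim_ definition above) =====
theorem two_pointer_swap_spec : Claim_equal_two_pointer_swap := by
  intro arr _
  unfold Spec_two_pointer_swap two_pointer_swap two_pointer_swap_alt
  cases arr with
  | nil => simp [pvDots, pvIdxs, loopA, loopB]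
  | cons x xs =>
    apply loop_eq
    · simp only [List.length_cons]; push_cast; omega
    · simp only [List.length_cons]; push_cast; omega
    · exact pairwise_pvDots _
    · intro d hd; have := mem_pvDots.mp hd; exact ⟨this.1.1, this.1.2, this.2⟩
    · exact (List.pairwise_reverse).mpr (pairwise_pvVals _)
    · intro v hv
      have := mem_pvVals.mp (List.mem_reverse.mp hv)
      exact ⟨this.1.1, by have := this.1.2; omega, this.2⟩
    · intro j hj0 hjl hjg
      exact Or.inl (List.mem_reverse.mpr (mem_pvVals.mpr ⟨⟨hj0, by omega⟩, hjg⟩))
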